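-- pv_equiv track=rewrite | github.com/kudelskisecurity/fuzzomatic | fuzzomatic/main.py | current_stats
-- ===== SOURCE A (Python) =====
-- def current_stats(generated_fuzz_targets):
--     building = 0
--     useful = 0
--     bug_found = 0
--
--     for fuzz_target in generated_fuzz_targets:
--         is_useful = fuzz_target["is_useful"]
--         is_bug_found = fuzz_target["bug_found"]
--         building += 1
--         if is_useful:
--             useful += 1
--         if is_bug_found:
--             bug_found += 1
--
--     return building, useful, bug_found
-- ===== SOURCE B (Python) =====
-- def current_stats(generated_fuzz_targets):
--     def stats(ts):
--         if not ts:
--             return (0, 0, 0)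
--         if len(ts) == 1:
--             t = ts[0]
--             return (1, 1 if t["is_useful"] else 0, 1 if t["bug_found"] else 0)
--         mid = len(ts) // 2
--         b1, u1, f1 = stats(ts[:mid])
--         b2, u2, f2 = stats(ts[mid:])
--         return (b1 + b2, u1 + u2, f1 + f2)
--     return stats(generated_fuzz_targets)
-- ===== Notes on version B (the rewrite author's own statement) =====
-- stated objective: alternative
-- what changed: Replaces A's single left-to-right loop with three mutable counters by a divide-and-conquer reduction: each element maps to an indicator triple and halves are combined by componentwise addition of recursively computed triples.
import Mathlib
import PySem

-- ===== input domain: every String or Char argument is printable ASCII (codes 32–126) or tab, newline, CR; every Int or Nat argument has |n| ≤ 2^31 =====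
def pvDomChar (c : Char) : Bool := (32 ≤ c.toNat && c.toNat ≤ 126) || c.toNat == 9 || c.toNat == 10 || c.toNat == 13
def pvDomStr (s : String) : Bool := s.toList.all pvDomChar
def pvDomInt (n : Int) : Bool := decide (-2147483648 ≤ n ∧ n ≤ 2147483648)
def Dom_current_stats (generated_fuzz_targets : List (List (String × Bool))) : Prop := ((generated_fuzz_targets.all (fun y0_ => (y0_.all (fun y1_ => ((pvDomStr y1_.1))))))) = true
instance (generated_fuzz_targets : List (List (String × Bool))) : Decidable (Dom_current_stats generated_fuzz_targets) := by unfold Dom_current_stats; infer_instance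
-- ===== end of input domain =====

-- B replaces A's fused three-counter loop by a divide-and-conquer reduction that adds indicator triples of the two halves componentwise.

-- ===== PORT A =====
-- fuzz_target["k"]: first-match lookup in the association list; a missing key is a
-- KeyError in Python — Pre_current_stats excludes those inputs, so the .getD false
-- default is never reached on admitted inputs.
def pvKey (t : List (String × Bool)) (k : String) : Bool := (t.lookup k).getD false

def currentStatsGo (ts : List (List (String × Bool))) (building useful bug_found : Int) : Int × Int × Int :=
  match ts with
  | [] => (building, useful, bug_found)
  | t :: rest =>
      let is_useful := pvKey t "is_useful"
      let is_bug_found := pvKey t "bug_found"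
      currentStatsGo rest (building + 1)
        (if is_useful then useful + 1 else useful)
        (if is_bug_found then bug_found + 1 else bug_found)

def current_stats (generated_fuzz_targets : List (List (String × Bool))) : Int × Int × Int :=
  currentStatsGo generated_fuzz_targets 0 0 0

-- ===== PORT B =====
-- recursive helper stats(ts): split at len//2, recurse on both halves, add triples.
def currentStatsDC (ts : List (List (String × Bool))) : Int × Int × Int :=
  match ts with
  | [] => (0, 0, 0)
  | [t] => (1, if pvKey t "is_useful" then 1 else 0, if pvKey t "bug_found" then 1 else 0)
  | a :: b :: rest =>
      let mid := (a :: b :: rest).length / 2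
      let l := currentStatsDC ((a :: b :: rest).take mid)
      let r := currentStatsDC ((a :: b :: rest).drop mid)
      (l.1 + r.1, l.2.1 + r.2.1, l.2.2 + r.2.2)
termination_by ts.length
decreasing_by
  · simp [List.length_take]; omega
  · simp; omega

def current_stats_alt (generated_fuzz_targets : List (List (String × Bool))) : Int × Int × Int :=
  currentStatsDC generated_fuzz_targets

-- ===== PRECONDITION & SPEC =====
-- Pre_ excludes exactly the inputs where some entry lacks the "is_useful" or "bug_found" key: Python A raises KeyError there.
def Pre_current_stats (generated_fuzz_targets : List (List (String × Bool))) : Prop :=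
  ∀ t ∈ generated_fuzz_targets, (t.lookup "is_useful").isSome ∧ (t.lookup "bug_found").isSome
instance (generated_fuzz_targets : List (List (String × Bool))) : Decidable (Pre_current_stats generated_fuzz_targets) := by unfold Pre_current_stats; infer_instance

def pvWitness_current_stats : (List (List (String × Bool))) :=
  [[("is_useful", true), ("bug_found", false)], [("is_useful", false), ("bug_found", true)]]

def Spec_current_stats (generated_fuzz_targets : List (List (String × Bool))) (out : Int × Int × Int) : Prop := out = current_stats_alt generated_fuzz_targets
instance (generated_fuzz_targets : List (List (String × Bool))) (out : Int × Int × Int) : Decidable (Spec_current_stats generated_fuzz_targets out) := by unfold Spec_current_stats; infer_instance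

-- ===== CLAIM (what is proved, stated in full; the proofs are below) =====
def Claim_equal_current_stats : Prop := ∀ (generated_fuzz_targets : List (List (String × Bool))), Dom_current_stats generated_fuzz_targets → Pre_current_stats generated_fuzz_targets → Spec_current_stats generated_fuzz_targets (current_stats generated_fuzz_targets)

-- ===== LEMMAS AND PROOFS =====
-- Both sides equal the closed form (length, count of useful, count of bug_found).
theorem currentStatsGo_eq (ts : List (List (String × Bool))) (b u f : Int) :
    currentStatsGo ts b u f =
      (b + ts.length,
       u + (ts.countP (fun t => pvKey t "is_useful") : Int),
       f + (ts.countP (fun t => pvKey t "bug_found") : Int)) := by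
  induction ts generalizing b u f with
  | nil => simp [currentStatsGo]
  | cons t rest ih =>
      simp only [currentStatsGo, ih, List.length_cons, List.countP_cons]
      split_ifs <;> simp_all [Prod.ext_iff] <;> omega

-- countP over the take/drop split of a list.
theorem countP_split {α : Type} (p : α → Bool) (l : List α) (i : Nat) :
    l.countP p = (l.take i).countP p + (l.drop i).countP p := by
  conv_lhs => rw [← List.take_append_drop i l]
  rw [List.countP_append]

theorem currentStatsDC_eq_aux : ∀ (n : Nat) (ts : List (List (String × Bool))), ts.length ≤ n →
    currentStatsDC ts =
      ((ts.length : Int),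
       (ts.countP (fun t => pvKey t "is_useful") : Int),
       (ts.countP (fun t => pvKey t "bug_found") : Int)) := by
  intro n
  induction n with
  | zero =>
      intro ts h
      cases ts with
      | nil => simp [currentStatsDC]
      | cons x xs => simp at h
  | succ n ih =>
      intro ts h
      match ts with
      | [] => simp [currentStatsDC]
      | [t] =>
          cases hu : pvKey t "is_useful" <;> cases hb : pvKey t "bug_found" <;>
            simp [currentStatsDC, hu, hb]
      | a :: b :: rest =>
          have h1 := ih ((a :: b :: rest).take ((a :: b :: rest).length / 2))
            (by rw [List.length_take]; simp only [List.length_cons] at h ⊢; omega)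
          have h2 := ih ((a :: b :: rest).drop ((a :: b :: rest).length / 2))
            (by rw [List.length_drop]; simp only [List.length_cons] at h ⊢; omega)
          rw [currentStatsDC]
          simp only [h1, h2]
          have hcu := countP_split (fun t => pvKey t "is_useful") (a :: b :: rest)
            ((a :: b :: rest).length / 2)
          have hcb := countP_split (fun t => pvKey t "bug_found") (a :: b :: rest)
            ((a :: b :: rest).length / 2)
          have hlen : ((a :: b :: rest).take ((a :: b :: rest).length / 2)).length
              + ((a :: b :: rest).drop ((a :: b :: rest).length / 2)).length
              = (a :: b :: rest).length := by
            rw [List.length_take, List.length_drop]; omega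
          simp only [Prod.ext_iff]
          refine ⟨?_, ?_, ?_⟩ <;> omega

theorem currentStatsDC_eq (ts : List (List (String × Bool))) :
    currentStatsDC ts =
      ((ts.length : Int),
       (ts.countP (fun t => pvKey t "is_useful") : Int),
       (ts.countP (fun t => pvKey t "bug_found") : Int)) :=
  currentStatsDC_eq_aux ts.length ts le_rfl

-- ===== VERDICT (by name: the statement is the Claim_ definition above) =====
theorem current_stats_spec : Claim_equal_current_stats := by
  intro g _ _
  unfold Spec_current_stats current_stats current_stats_alt
  simp [currentStatsGo_eq, currentStatsDC_eq]
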